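-- pv_equiv track=rewrite | github.com/newtykip/the-honk | challenges/daily-programmer/#391 - ABACABA.py | abacaba
-- ===== SOURCE A (Python) =====
-- from string import ascii_lowercase
--
-- def abacaba(n):
-- 	output = ''
-- 	currLetter = 0
-- 	for i in range(n):
-- 		output = '{0}{1}{2}'.format(output, ascii_lowercase[currLetter], output)
-- 		currLetter = currLetter + 1
-- 		if currLetter > 25:
-- 			currLetter = 0
-- 	return output
-- ===== SOURCE B (Python) =====
-- from string import ascii_lowercase
--
-- def abacaba(n):
--     if n <= 0:
--         return ''
--     s = abacaba(n - 1)
--     return s + ascii_lowercase[(n - 1) % 26] + s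
-- ===== Notes on version B (the rewrite author's own statement) =====
-- stated objective: alternative
-- what changed: Replaces the accumulating loop with a letter counter by a divide-and-conquer recursion on the self-similar structure: level n is abacaba(n-1) + letter((n-1)%26) + abacaba(n-1).
import Mathlib
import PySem

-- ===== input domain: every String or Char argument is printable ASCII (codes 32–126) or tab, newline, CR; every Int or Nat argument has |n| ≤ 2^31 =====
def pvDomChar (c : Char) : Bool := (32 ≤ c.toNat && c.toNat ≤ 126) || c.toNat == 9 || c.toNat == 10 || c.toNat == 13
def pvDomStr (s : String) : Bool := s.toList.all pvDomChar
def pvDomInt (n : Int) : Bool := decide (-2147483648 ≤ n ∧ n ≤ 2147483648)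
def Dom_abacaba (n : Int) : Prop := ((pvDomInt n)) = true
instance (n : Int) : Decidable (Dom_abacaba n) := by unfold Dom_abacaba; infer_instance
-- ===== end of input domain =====

-- B replaces A's accumulating loop-with-counter by a divide-and-conquer recursion on the
-- self-similar structure (alternative decomposition, same cost).


-- ===== PORT A =====
def asciiLowercase : String := "abcdefghijklmnopqrstuvwxyz"

-- the index is always in 0..25, so the 'a' default of getD is never used (Python never raises here)
def abacaba (n : Int) : String :=
  ((PySem.List.pyRange 0 n 1).foldl
    (fun (st : String × Int) _ =>
      let output := st.1 ++ String.ofList [((PySem.Str.pyGet? asciiLowercase st.2).getD 'a')] ++ st.1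
      let currLetter := st.2 + 1
      (output, if currLetter > 25 then 0 else currLetter))
    ("", 0)).1

-- ===== PORT B =====
def abacabaNat : Nat → String
  | 0 => ""
  | k + 1 =>
    let s := abacabaNat k
    s ++ String.ofList [((PySem.Str.pyGet? asciiLowercase ((k : Int) % 26)).getD 'a')] ++ s

def abacaba_alt (n : Int) : String :=
  if n ≤ 0 then "" else abacabaNat n.toNat

-- ===== PRECONDITION & SPEC =====
def Spec_abacaba (n : Int) (out : String) : Prop := out = abacaba_alt n
instance (n : Int) (out : String) : Decidable (Spec_abacaba n out) := by unfold Spec_abacaba; infer_instance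

-- ===== CLAIM (what is proved, stated in full; the proofs are below) =====
def Claim_equal_abacaba : Prop := ∀ (n : Int), Dom_abacaba n → Spec_abacaba n (abacaba n)

-- ===== LEMMAS AND PROOFS =====

-- loop invariant: after m iterations the state is (abacabaNat m, m % 26)
theorem abacaba_loop_inv (m : Nat) :
    ((PySem.List.pyRange 0 (m : Int) 1).foldl
      (fun (st : String × Int) _ =>
        let output := st.1 ++ String.ofList [((PySem.Str.pyGet? asciiLowercase st.2).getD 'a')] ++ st.1
        let currLetter := st.2 + 1
        (output, if currLetter > 25 then 0 else currLetter))
      ("", 0)) = (abacabaNat m, (m : Int) % 26) := by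
  induction m with
  | zero => simp [PySem.List.pyRange_one_eq_nil, abacabaNat]
  | succ k ih =>
    have h : PySem.List.pyRange 0 ((k : Int) + 1) 1
        = PySem.List.pyRange 0 (k : Int) 1 ++ [(k : Int)] := by
      exact PySem.List.pyRange_one_succ_right (by positivity)
    have hc : ((k : Int) % 26 + 1 > 25 → ((0 : Int) = ((k : Nat) + 1 : Nat) % 26)) ∧
        (¬ ((k : Int) % 26 + 1 > 25) → ((k : Int) % 26 + 1 = ((k : Nat) + 1 : Nat) % 26)) := by
      constructor <;> intro h' <;> omega
    push_cast
    rw [h, List.foldl_append, ih]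
    simp only [List.foldl]
    refine Prod.ext rfl ?_
    split_ifs with hgt
    · simpa using hc.1 hgt
    · simpa using hc.2 hgt

theorem abacaba_spec : Claim_equal_abacaba := by
  unfold Claim_equal_abacaba Spec_abacaba abacaba abacaba_alt
  intro n _
  split_ifs with hle
  · rw [PySem.List.pyRange_one_eq_nil (by omega)]
    rfl
  · have hn : n = (n.toNat : Int) := by omega
    rw [hn, abacaba_loop_inv]
    congr 1

-- ===== VERDICT (by name: the statement is the Claim_ definition above) =====
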